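-- pv_equiv track=rewrite | github.com/suniel12/AgentCI | src/agentci/engine/metrics.py | detect_loops
-- ===== SOURCE A (Python) =====
-- def detect_loops(tool_sequence: list[str]) -> int:
--     """Count consecutive repeated tool invocations.
--
--     Example: ['a', 'a', 'b', 'b', 'b'] → 3  (a-a is 1, b-b-b is 2)
--     """
--     if not tool_sequence:
--         return 0
--     loops = 0
--     for i in range(1, len(tool_sequence)):
--         if tool_sequence[i] == tool_sequence[i - 1]:
--             loops += 1
--     return loops
-- ===== SOURCE B (Python) =====
-- from itertools import groupby
--
--
-- def detect_loops(tool_sequence: list[str]) -> int: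
--     """Count consecutive repeated tool invocations.
--
--     Length of the sequence minus the number of maximal runs of equal
--     consecutive tools: each run of length k contributes k - 1 repeats.
--     """
--     return len(tool_sequence) - sum(1 for _ in groupby(tool_sequence))
-- ===== Notes on version B (the rewrite author's own statement) =====
-- stated objective: idiomatic
-- what changed: Replaces the index-based adjacent-comparison loop by itertools.groupby run partitioning: the result is len(tool_sequence) minus the number of maximal runs, since a run of length k contributes k-1 repeats.
import Mathlib
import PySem

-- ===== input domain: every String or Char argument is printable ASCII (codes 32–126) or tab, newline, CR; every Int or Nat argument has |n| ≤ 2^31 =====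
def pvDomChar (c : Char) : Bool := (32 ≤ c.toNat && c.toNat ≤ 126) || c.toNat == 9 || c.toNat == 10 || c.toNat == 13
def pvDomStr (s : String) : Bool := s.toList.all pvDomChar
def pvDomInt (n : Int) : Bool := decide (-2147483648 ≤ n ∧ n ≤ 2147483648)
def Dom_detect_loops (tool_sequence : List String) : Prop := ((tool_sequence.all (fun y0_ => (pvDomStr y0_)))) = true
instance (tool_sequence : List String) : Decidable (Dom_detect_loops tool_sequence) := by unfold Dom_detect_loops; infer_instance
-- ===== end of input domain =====

-- B replaces A's index-based adjacent-comparison loop by run partitioning (groupby):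
-- result = length minus number of maximal runs; idiomatic, same cost.

-- ===== PORT A =====
-- 'loops += 1' loop over range(1, len) comparing tool_sequence[i] with tool_sequence[i-1]
def detect_loops (tool_sequence : List String) : Int :=
  if tool_sequence = [] then 0
  else
    (PySem.List.pyRange 1 (tool_sequence.length : Int) 1).foldl
      (fun loops i =>
        if PySem.List.pyGetD tool_sequence i "" = PySem.List.pyGetD tool_sequence (i - 1) ""
        then loops + 1 else loops) 0

-- ===== PORT B =====
-- number of maximal runs of equal consecutive elements (itertools.groupby group count)
def pvRunCount : List String → Int
  | [] => 0
  | [_] => 1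
  | x :: y :: rest => (if x = y then 0 else 1) + pvRunCount (y :: rest)

def detect_loops_alt (tool_sequence : List String) : Int :=
  (tool_sequence.length : Int) - pvRunCount tool_sequence

-- ===== PRECONDITION & SPEC =====
def Spec_detect_loops (tool_sequence : List String) (out : Int) : Prop := out = detect_loops_alt tool_sequence
instance (tool_sequence : List String) (out : Int) : Decidable (Spec_detect_loops tool_sequence out) := by unfold Spec_detect_loops; infer_instance

-- ===== CLAIM (what is proved, stated in full; the proofs are below) =====
def Claim_equal_detect_loops : Prop := ∀ (tool_sequence : List String), Dom_detect_loops tool_sequence → Spec_detect_loops tool_sequence (detect_loops tool_sequence)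

-- ===== LEMMAS AND PROOFS =====

-- count of adjacent equal pairs, front-recursively
def pvAdj : List String → Int
  | [] => 0
  | [_] => 0
  | x :: y :: rest => (if x = y then 1 else 0) + pvAdj (y :: rest)

lemma pvAlt_eq_adj (ts : List String) : detect_loops_alt ts = pvAdj ts := by
  unfold detect_loops_alt
  induction ts with
  | nil => simp [pvRunCount, pvAdj]
  | cons x xs ih =>
    cases xs with
    | nil => simp [pvRunCount, pvAdj]
    | cons y rest =>
      simp only [pvRunCount, pvAdj]
      have := ih
      split_ifs with h <;> simp [List.length_cons] at this ⊢ <;> omega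

lemma pvAdj_append_singleton (xs : List String) (hxs : xs ≠ []) (y : String) :
    pvAdj (xs ++ [y]) = pvAdj xs + (if xs.getLast hxs = y then 1 else 0) := by
  induction xs with
  | nil => simp at hxs
  | cons x rest ih =>
    cases rest with
    | nil => simp [pvAdj]
    | cons z t =>
      have h2 : (z :: t) ≠ [] := by simp
      simp only [List.cons_append, pvAdj]
      have h3 := ih h2
      simp only [List.cons_append] at h3
      rw [h3, List.getLast_cons h2]
      omega

lemma pvGetD_append_lt (xs : List String) (y : String) (i : Int)
    (h0 : 0 ≤ i) (hl : i < (xs.length : Int)) (d : String) :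
    PySem.List.pyGetD (xs ++ [y]) i d = PySem.List.pyGetD xs i d := by
  rw [PySem.List.pyGetD_eq_getElem (xs ++ [y]) d h0 (by simp; omega),
      PySem.List.pyGetD_eq_getElem xs d h0 hl]
  exact List.getElem_append_left (by omega)

lemma pvA_eq_adj (ts : List String) : detect_loops ts = pvAdj ts := by
  induction ts using List.reverseRecOn with
  | nil => simp [detect_loops, pvAdj]
  | append_singleton xs y ih =>
    cases hxs : xs with
    | nil =>
      simp [detect_loops, pvAdj, PySem.List.pyRange_one_eq_nil]
    | cons x rest =>
      subst hxs
      have hne : x :: rest ≠ [] := by simp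
      have hne2 : (x :: rest) ++ [y] ≠ [] := by simp
      have hlen : (((x :: rest) ++ [y]).length : Int) = ((x :: rest).length : Int) + 1 := by
        simp
      unfold detect_loops
      rw [if_neg hne2, hlen,
          PySem.List.pyRange_one_succ_right (a := 1) (b := ((x :: rest).length : Int)) (by simp),
          List.foldl_append]
      simp only [List.foldl_cons, List.foldl_nil]
      have hcongr :
          (PySem.List.pyRange 1 ((x :: rest).length : Int) 1).foldl
            (fun loops i =>
              if PySem.List.pyGetD ((x :: rest) ++ [y]) i "" =
                 PySem.List.pyGetD ((x :: rest) ++ [y]) (i - 1) ""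
              then loops + 1 else loops) 0
          = (PySem.List.pyRange 1 ((x :: rest).length : Int) 1).foldl
            (fun loops i =>
              if PySem.List.pyGetD (x :: rest) i "" =
                 PySem.List.pyGetD (x :: rest) (i - 1) ""
              then loops + 1 else loops) (0 : Int) := by
        apply PySem.List.foldl_congr_mem
        intro acc i hi
        rw [PySem.List.mem_pyRange_one] at hi
        rw [pvGetD_append_lt _ _ _ (by omega) (by omega),
            pvGetD_append_lt _ _ _ (by omega) (by omega)]
      rw [hcongr]
      have hA : (PySem.List.pyRange 1 ((x :: rest).length : Int) 1).foldl
            (fun loops i =>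
              if PySem.List.pyGetD (x :: rest) i "" =
                 PySem.List.pyGetD (x :: rest) (i - 1) ""
              then loops + 1 else loops) (0 : Int) = pvAdj (x :: rest) := by
        have := ih
        unfold detect_loops at this
        rwa [if_neg hne] at this
      rw [hA]
      -- last two gets: index length and length - 1
      have hget1 : PySem.List.pyGetD ((x :: rest) ++ [y]) ((x :: rest).length : Int) "" = y := by
        rw [PySem.List.pyGetD_eq_getElem ((x :: rest) ++ [y]) "" (by positivity) (by simp)]
        simp
      have hget2 : PySem.List.pyGetD ((x :: rest) ++ [y]) (((x :: rest).length : Int) - 1) ""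
          = (x :: rest).getLast hne := by
        rw [pvGetD_append_lt _ _ _ (by simp) (by simp),
            PySem.List.pyGetD_eq_getElem (x :: rest) "" (by simp) (by simp)]
        rw [List.getLast_eq_getElem]
        congr 1
        simp
      rw [hget1, hget2, pvAdj_append_singleton _ hne]
      split_ifs with h h' h' <;> first | omega | (exact absurd h.symm h') | (exact absurd h'.symm h)

-- ===== VERDICT (by name: the statement is the Claim_ definition above) =====
theorem detect_loops_spec : Claim_equal_detect_loops := by
  intro ts _
  unfold Spec_detect_loops
  rw [pvA_eq_adj, pvAlt_eq_adj]
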